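-- pv_equiv track=rewrite | github.com/jcanedo279/ptv | backend/api.py | genttm
-- ===== SOURCE A (Python) =====
-- def genttm(dim):
--     # Intent: Find the tile type of all tiles
--     if dim % 2 == 0:
--         numTileTypes = int((dim/2)-1)
--     else:
--         numTileTypes = int((dim-1)/2)
--     # create tile type adjacency matrix
--     ttm = [[0 for x in range(dim)] for y in range(dim)]
--     for x in range(dim):
--         for y in range(1, numTileTypes+1):
--             if x+y >= dim:
--                 ttm[x][(x+y)-dim] = y-1
--             else:
--                 ttm[x][x+y] = y-1
--             ttm[x][x-y] = y-1
--     return ttm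
-- ===== SOURCE B (Python) =====
-- def genttm(dim):
--     if dim % 2 == 0:
--         numTileTypes = dim // 2 - 1
--     else:
--         numTileTypes = (dim - 1) // 2
--     # value of a cell at circular distance t along a row
--     base = [d - 1 if 1 <= d <= numTileTypes else 0
--             for d in (min(t, dim - t) for t in range(dim))]
--     # row x is the base profile rotated right by x
--     return [base[dim - x:] + base[:dim - x] for x in range(dim)]
-- ===== Notes on version B (the rewrite author's own statement) =====
-- stated objective: faster
-- what changed: Replaces A's per-row scatter writes (two in-place assignments per (x,y) with manual wraparound into a preallocated zero matrix) by a closed form over circular distance: the distance profile row is computed once, and every row is produced as a rotation (two slices) of that base row. Intended as faster by a constant factor; a timing run measured B 4.66x faster at the largest size both implementations finished.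
import Mathlib
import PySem

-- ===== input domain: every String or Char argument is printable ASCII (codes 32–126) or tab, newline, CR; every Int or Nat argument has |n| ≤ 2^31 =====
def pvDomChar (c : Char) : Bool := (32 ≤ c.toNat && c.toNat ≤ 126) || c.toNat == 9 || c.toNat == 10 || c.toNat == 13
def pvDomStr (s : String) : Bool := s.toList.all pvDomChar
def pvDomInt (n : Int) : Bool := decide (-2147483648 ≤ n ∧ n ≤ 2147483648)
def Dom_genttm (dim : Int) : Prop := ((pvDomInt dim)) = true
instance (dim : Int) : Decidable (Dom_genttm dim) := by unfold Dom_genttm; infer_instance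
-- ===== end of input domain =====

-- B replaces A's per-row scatter writes into a preallocated zero matrix by a closed form:
-- one circular-distance base row, each row a rotation (two slices) of it; intended as
-- faster by constant factor (measured 4.66x at the largest size both finished).


-- ===== PORT A =====
-- Python list element assignment l[i] = v (negative index wraps; all writes A performs
-- are in range, so the out-of-range no-op of List.set is never reached on Dom).
def pySet {α : Type} (l : List α) (i : Int) (v : α) : List α :=
  l.set (if i < 0 then i + l.length else i).toNat v

-- Python 'm[x][j] = v' : fetch row x, assign element j. A only uses in-range x.
def setCell (m : List (List Int)) (x j v : Int) : List (List Int) :=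
  match PySem.List.pyGet? m x with
  | some row => pySet m x (pySet row j v)
  | none => m

-- int((dim/2)-1) and int((dim-1)/2): exact on Dom (|dim| ≤ 2^31 < 2^52, the float
-- quotients are integer-valued, so int() equals floor division).
def genttm (dim : Int) : List (List Int) :=
  let numTileTypes : Int :=
    if PySem.Int.mod dim 2 = 0 then PySem.Int.floordiv dim 2 - 1
    else PySem.Int.floordiv (dim - 1) 2
  let ttm : List (List Int) :=
    (PySem.List.pyRange 0 dim 1).map (fun _ => (PySem.List.pyRange 0 dim 1).map (fun _ => (0 : Int)))
  (PySem.List.pyRange 0 dim 1).foldl (fun ttm x =>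
    (PySem.List.pyRange 1 (numTileTypes + 1) 1).foldl (fun ttm y =>
      let ttm := if dim ≤ x + y then setCell ttm x ((x + y) - dim) (y - 1)
                 else setCell ttm x (x + y) (y - 1)
      setCell ttm x (x - y) (y - 1)) ttm) ttm

-- ===== PORT B =====
def genttm_alt (dim : Int) : List (List Int) :=
  let numTileTypes : Int :=
    if PySem.Int.mod dim 2 = 0 then PySem.Int.floordiv dim 2 - 1
    else PySem.Int.floordiv (dim - 1) 2
  let base : List Int := (PySem.List.pyRange 0 dim 1).map (fun t =>
    let d := min t (dim - t)
    if 1 ≤ d ∧ d ≤ numTileTypes then d - 1 else 0)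
  (PySem.List.pyRange 0 dim 1).map (fun x =>
    PySem.List.slice base (some (dim - x)) none ++ PySem.List.slice base none (some (dim - x)))

-- ===== PRECONDITION & SPEC =====
def Spec_genttm (dim : Int) (out : List (List Int)) : Prop := out = genttm_alt dim
instance (dim : Int) (out : List (List Int)) : Decidable (Spec_genttm dim out) := by unfold Spec_genttm; infer_instance

-- ===== CLAIM (what is proved, stated in full; the proofs are below) =====
def Claim_equal_genttm : Prop := ∀ (dim : Int), Dom_genttm dim → Spec_genttm dim (genttm dim)

-- ===== LEMMAS AND PROOFS =====

-- circular distance used by B, in emod form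
def dmin (dim x j : Int) : Int := min ((j - x) % dim) ((x - j) % dim)

-- A's inner-loop body acting on a single row
def rowStep (dim x : Int) (row : List Int) (y : Int) : List Int :=
  pySet (if dim ≤ x + y then pySet row ((x + y) - dim) (y - 1) else pySet row (x + y) (y - 1))
    (x - y) (y - 1)

theorem emod_small_pos (a dim : Int) (hd : 0 < dim) (h1 : -dim ≤ a) (h2 : a < dim) :
    a % dim = if a < 0 then a + dim else a := by
  split_ifs with h
  · have h3 : (a + dim) % dim = a + dim := Int.emod_eq_of_lt (by omega) (by omega)
    rw [← Int.add_emod_right a dim, h3]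
  · exact Int.emod_eq_of_lt (by omega) h2

theorem pySet_map_pyRange {α : Type} (g : Int → α) (dim i : Int) (v : α) (h0 : -dim ≤ i) (h1 : i < dim) :
    pySet ((PySem.List.pyRange 0 dim 1).map g) i v
      = (PySem.List.pyRange 0 dim 1).map (fun j => if j = (if i < 0 then i + dim else i) then v else g j) := by
  unfold pySet
  have hlen : ((PySem.List.pyRange 0 dim 1).map g).length = dim.toNat := by
    simp [PySem.List.length_pyRange_one]
  apply List.ext_getElem
  · simp
  · intro k hk1 hk2
    have hk : (k : Int) < dim := by
      have := hk2; simp [PySem.List.length_pyRange_one] at this; omega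
    simp only [List.getElem_set, List.getElem_map, PySem.List.getElem_pyRange_one, hlen]
    split_ifs with hA hB hB <;> first | rfl | (exfalso; omega)

theorem setCell_map_pyRange (F : Int → List Int) (dim x j v : Int)
    (hx0 : 0 ≤ x) (hx : x < dim) :
    setCell ((PySem.List.pyRange 0 dim 1).map F) x j v
      = (PySem.List.pyRange 0 dim 1).map (fun x' => if x' = x then pySet (F x) j v else F x') := by
  have hget : PySem.List.pyGet? ((PySem.List.pyRange 0 dim 1).map F) x = some (F x) := by
    rw [PySem.List.pyGet?_eq_some_getElem]
    · simp [PySem.List.getElem_pyRange_one, Int.toNat_of_nonneg hx0]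
    · exact hx0
    · simp [PySem.List.length_pyRange_one]; omega
  unfold setCell
  rw [hget]
  show pySet ((PySem.List.pyRange 0 dim 1).map F) x (pySet (F x) j v) = _
  rw [pySet_map_pyRange F dim x _ (by omega) hx]
  apply List.map_congr_left
  intro a _
  simp [show ¬ x < 0 by omega]


def zeroRow (dim : Int) : List Int := (PySem.List.pyRange 0 dim 1).map (fun _ => 0)

def rowA (dim ntt x : Int) : List Int :=
  (PySem.List.pyRange 1 (ntt + 1) 1).foldl (rowStep dim x) (zeroRow dim)

-- the inner y-loop on the whole matrix only rewrites row x
theorem fold_setCell_map (dim x : Int) (hx0 : 0 ≤ x) (hx : x < dim) :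
    ∀ (ys : List Int) (F : Int → List Int),
    ys.foldl (fun m y =>
        setCell (if dim ≤ x + y then setCell m x ((x + y) - dim) (y - 1)
                 else setCell m x (x + y) (y - 1)) x (x - y) (y - 1))
      ((PySem.List.pyRange 0 dim 1).map F)
    = (PySem.List.pyRange 0 dim 1).map
        (fun x' => if x' = x then ys.foldl (rowStep dim x) (F x) else F x') := by
  intro ys
  induction ys with
  | nil =>
    intro F
    simp only [List.foldl_nil]
    apply List.map_congr_left
    intro a _
    split_ifs with h
    · rw [h]
    · rfl
  | cons y ys ih =>
    intro F
    simp only [List.foldl_cons]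
    have hstep :
        setCell (if dim ≤ x + y then setCell ((PySem.List.pyRange 0 dim 1).map F) x ((x + y) - dim) (y - 1)
                 else setCell ((PySem.List.pyRange 0 dim 1).map F) x (x + y) (y - 1)) x (x - y) (y - 1)
        = (PySem.List.pyRange 0 dim 1).map
            (fun x' => if x' = x then rowStep dim x (F x) y else F x') := by
      by_cases hc : dim ≤ x + y
      · rw [if_pos hc, setCell_map_pyRange F dim x _ _ hx0 hx,
          setCell_map_pyRange _ dim x _ _ hx0 hx]
        apply List.map_congr_left
        intro a _
        by_cases ha : a = x
        · simp [ha, rowStep, if_pos hc]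
        · simp [ha]
      · rw [if_neg hc, setCell_map_pyRange F dim x _ _ hx0 hx,
          setCell_map_pyRange _ dim x _ _ hx0 hx]
        apply List.map_congr_left
        intro a _
        by_cases ha : a = x
        · simp [ha, rowStep, if_neg hc]
        · simp [ha]
    rw [hstep, ih]
    apply List.map_congr_left
    intro a _
    by_cases ha : a = x
    · simp [ha]
    · simp [ha]

-- the outer x-loop builds the matrix row by row
theorem outer_fold (dim ntt : Int) (hd : 0 < dim) :
    ∀ (K : Nat), (K : Int) ≤ dim →
    (PySem.List.pyRange 0 (K : Int) 1).foldl (fun ttm x =>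
        (PySem.List.pyRange 1 (ntt + 1) 1).foldl (fun ttm y =>
          setCell (if dim ≤ x + y then setCell ttm x ((x + y) - dim) (y - 1)
                   else setCell ttm x (x + y) (y - 1)) x (x - y) (y - 1)) ttm)
      ((PySem.List.pyRange 0 dim 1).map (fun _ => zeroRow dim))
    = (PySem.List.pyRange 0 dim 1).map
        (fun x => if x < (K : Int) then rowA dim ntt x else zeroRow dim) := by
  intro K
  induction K with
  | zero =>
    intro _
    rw [show PySem.List.pyRange 0 ((0 : Nat) : Int) 1 = [] from
      PySem.List.pyRange_one_eq_nil (by simp)]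
    simp only [List.foldl_nil]
    apply List.map_congr_left
    intro a ha
    rw [PySem.List.mem_pyRange_one] at ha
    rw [if_neg (by omega)]
  | succ K ih =>
    intro hK
    have hcast : ((K + 1 : Nat) : Int) = (K : Int) + 1 := by push_cast; ring
    rw [hcast, show PySem.List.pyRange 0 ((K : Int) + 1) 1
        = PySem.List.pyRange 0 (K : Int) 1 ++ [(K : Int)] from
      PySem.List.pyRange_one_succ_right (by positivity), List.foldl_append,
      ih (by omega)]
    simp only [List.foldl_cons, List.foldl_nil]
    rw [fold_setCell_map dim (K : Int) (by positivity) (by omega)]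
    apply List.map_congr_left
    intro a ha
    rw [PySem.List.mem_pyRange_one] at ha
    by_cases h1 : a = (K : Int)
    · subst h1
      rw [if_pos rfl, if_neg (lt_irrefl ((K : Int))), if_pos (by omega)]
      rfl
    · rw [if_neg h1]
      by_cases h2 : a < (K : Int)
      · rw [if_pos h2, if_pos (by omega)]
      · rw [if_neg h2, if_neg (by omega)]

-- per-cell effect of one y-iteration
theorem cell_step (dim x j y jd : Int) (K : Nat) (hd : 0 < dim) (hx0 : 0 ≤ x) (hx : x < dim)
    (hj0 : 0 ≤ j) (hj : j < dim) (hy : y = (K : Int) + 1) (hy2 : 2 * y < dim)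
    (hjd : jd = if dim ≤ x + y then x + y - dim else x + y) :
    (if j = (if x - y < 0 then x - y + dim else x - y) then y - 1
     else if j = (if jd < 0 then jd + dim else jd) then y - 1
     else if 1 ≤ dmin dim x j ∧ dmin dim x j ≤ (K : Int) then dmin dim x j - 1 else 0)
    = if 1 ≤ dmin dim x j ∧ dmin dim x j ≤ (K : Int) + 1 then dmin dim x j - 1 else 0 := by
  have e1 : (j - x) % dim = if j - x < 0 then j - x + dim else j - x :=
    emod_small_pos _ _ hd (by omega) (by omega)
  have e2 : (x - j) % dim = if x - j < 0 then x - j + dim else x - j :=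
    emod_small_pos _ _ hd (by omega) (by omega)
  unfold dmin
  rw [e1, e2]
  split_ifs <;> omega

-- the y-loop on one row produces B's closed-form row
theorem inner_row (dim ntt x : Int) (hd : 0 < dim) (hx0 : 0 ≤ x) (hx : x < dim)
    (hn2 : 2 * ntt < dim) :
    ∀ (K : Nat), (K : Int) ≤ ntt →
    (PySem.List.pyRange 1 ((K : Int) + 1) 1).foldl (rowStep dim x) (zeroRow dim)
    = (PySem.List.pyRange 0 dim 1).map
        (fun j => if 1 ≤ dmin dim x j ∧ dmin dim x j ≤ (K : Int) then dmin dim x j - 1 else 0) := by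
  intro K
  induction K with
  | zero =>
    intro _
    rw [show PySem.List.pyRange 1 (((0 : Nat) : Int) + 1) 1 = [] from
      PySem.List.pyRange_one_eq_nil (by simp)]
    simp only [List.foldl_nil]
    unfold zeroRow
    apply List.map_congr_left
    intro j _
    split_ifs with h
    · omega
    · rfl
  | succ K ih =>
    intro hK
    set y : Int := (K : Int) + 1 with hy
    have hy1 : 1 ≤ y := by omega
    have hy2 : 2 * y < dim := by omega
    have hcast : ((K + 1 : Nat) : Int) + 1 = y + 1 := by push_cast; omega
    rw [hcast, show PySem.List.pyRange 1 (y + 1) 1 = PySem.List.pyRange 1 y 1 ++ [y] from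
      PySem.List.pyRange_one_succ_right (by omega), show y = (K : Int) + 1 from hy,
      List.foldl_append, ih (by omega)]
    simp only [List.foldl_cons, List.foldl_nil]
    unfold rowStep
    by_cases hc : dim ≤ x + y
    · rw [if_pos hc,
        pySet_map_pyRange _ dim (x + y - dim) _ (by omega) (by omega),
        pySet_map_pyRange _ dim (x - y) _ (by omega) (by omega)]
      apply List.map_congr_left
      intro j hj
      rw [PySem.List.mem_pyRange_one] at hj
      exact cell_step dim x j y (x + y - dim) K hd hx0 hx (by omega) (by omega) hy hy2
        (by rw [if_pos hc])
    · rw [if_neg hc,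
        pySet_map_pyRange _ dim (x + y) _ (by omega) (by omega),
        pySet_map_pyRange _ dim (x - y) _ (by omega) (by omega)]
      apply List.map_congr_left
      intro j hj
      rw [PySem.List.mem_pyRange_one] at hj
      exact cell_step dim x j y (x + y) K hd hx0 hx (by omega) (by omega) hy hy2
        (by rw [if_neg hc])

-- a right rotation by x of a range-indexed row, written as Python's two slices
theorem rot_map_pyRange (g : Int → Int) (dim x : Int) (hd : 0 < dim) (hx0 : 0 ≤ x) (hx : x < dim) :
    PySem.List.slice ((PySem.List.pyRange 0 dim 1).map g) (some (dim - x)) none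
      ++ PySem.List.slice ((PySem.List.pyRange 0 dim 1).map g) none (some (dim - x))
    = (PySem.List.pyRange 0 dim 1).map (fun j => if j < x then g (j - x + dim) else g (j - x)) := by
  rw [PySem.List.slice_from _ (show (0:Int) ≤ dim - x by omega),
    PySem.List.slice_to _ (show (0:Int) ≤ dim - x by omega)]
  apply List.ext_getElem
  · simp [PySem.List.length_pyRange_one]
    omega
  · intro k h1 h2
    have hk : (k : Int) < dim := by
      simp [PySem.List.length_pyRange_one] at h2; omega
    simp only [List.getElem_append, List.getElem_drop, List.getElem_take, List.getElem_map,
      PySem.List.getElem_pyRange_one, List.length_drop, List.length_map,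
      PySem.List.length_pyRange_one]
    split_ifs <;> (congr 1; omega)

-- ===== VERDICT (by name: the statement is the Claim_ definition above) =====
theorem genttm_spec : Claim_equal_genttm := by
  intro dim _
  unfold Spec_genttm
  by_cases hd : 0 < dim
  · have hm2 : PySem.Int.mod dim 2 = dim % 2 := PySem.Int.mod_eq_emod_of_pos (by norm_num)
    have hf1 : PySem.Int.floordiv dim 2 = dim / 2 := PySem.Int.floordiv_eq_ediv_of_pos (by norm_num)
    have hf2 : PySem.Int.floordiv (dim - 1) 2 = (dim - 1) / 2 := PySem.Int.floordiv_eq_ediv_of_pos (by norm_num)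
    simp only [genttm, genttm_alt, hm2, hf1, hf2]
    set ntt : Int := if dim % 2 = 0 then dim / 2 - 1 else (dim - 1) / 2 with hntt
    have hn0 : 0 ≤ ntt := by
      rw [hntt]; split_ifs with h <;> omega
    have hn2 : 2 * ntt < dim := by
      rw [hntt]; split_ifs with h <;> omega
    have hKd : ((dim.toNat : Nat) : Int) = dim := Int.toNat_of_nonneg (by omega)
    have houter := outer_fold dim ntt hd dim.toNat (by omega)
    rw [hKd] at houter
    rw [show ((PySem.List.pyRange 0 dim 1).map
          (fun _ => (PySem.List.pyRange 0 dim 1).map (fun _ => (0 : Int))))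
        = ((PySem.List.pyRange 0 dim 1).map (fun _ => zeroRow dim)) from rfl, houter]
    apply List.map_congr_left
    intro x hxm
    rw [PySem.List.mem_pyRange_one] at hxm
    rw [if_pos (by omega)]
    have hKn : ((ntt.toNat : Nat) : Int) = ntt := Int.toNat_of_nonneg hn0
    have hrow := inner_row dim ntt x hd (by omega) (by omega) hn2 ntt.toNat (by omega)
    rw [hKn] at hrow
    unfold rowA
    rw [hrow,
      rot_map_pyRange (fun t => if 1 ≤ min t (dim - t) ∧ min t (dim - t) ≤ ntt
        then min t (dim - t) - 1 else 0) dim x hd (by omega) (by omega)]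
    apply List.map_congr_left
    intro j hj
    rw [PySem.List.mem_pyRange_one] at hj
    have e1 := emod_small_pos (j - x) dim hd (by omega) (by omega)
    have e2 := emod_small_pos (x - j) dim hd (by omega) (by omega)
    simp only [dmin, e1, e2]
    split_ifs <;> omega
  · have hnil : PySem.List.pyRange 0 dim 1 = [] :=
      PySem.List.pyRange_one_eq_nil (by omega)
    simp [genttm, genttm_alt, hnil]
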